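-- pv_equiv track=rewrite | github.com/ojashyadav101/lucy | src/lucy/core/output.py | _convert_tables_to_lists
-- ===== SOURCE A (Python) =====
-- def _convert_tables_to_lists(text: str) -> str:
--     lines = text.split("\n")
--     result: list[str] = []
--     i = 0
--     while i < len(lines):
--         line = lines[i].strip()
--         if "|" in line and line.startswith("|"):
--             table_lines: list[str] = []
--             while (
--                 i < len(lines)
--                 and "|" in lines[i].strip()
--                 and lines[i].strip().startswith("|")
--             ):
--                 table_lines.append(lines[i].strip())
--                 i += 1
--             result.extend(_table_to_bullets(table_lines))
--         else:
--             result.append(lines[i])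
--             i += 1
--     return "\n".join(result)
--
-- def _table_to_bullets(table_lines: list[str]) -> list[str]:
--     rows: list[list[str]] = []
--     for line in table_lines:
--         cells = [c.strip() for c in line.strip("|").split("|")]
--         cells = [c for c in cells if c]
--         if cells and not all(
--             c.replace("-", "").replace(":", "").strip() == "" for c in cells
--         ):
--             rows.append(cells)
--
--     if len(rows) < 2:
--         return table_lines
--
--     headers = rows[0]
--     bullets: list[str] = []
--     for row in rows[1:]:
--         if len(headers) >= 2 and len(row) >= 2:
--             label = row[0]
--             details = " — ".join(
--                 f"{headers[j]}: {row[j]}"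
--                 for j in range(1, min(len(headers), len(row)))
--                 if row[j].strip()
--             )
--             bullets.append(f"• *{label}* — {details}" if details else f"• *{label}*")
--         else:
--             bullets.append(f"• {' | '.join(row)}")
--     return [""] + bullets + [""]
-- ===== SOURCE B (Python) =====
-- def _table_to_bullets(table_lines: list[str]) -> list[str]:
--     parsed = [[c.strip() for c in l.strip("|").split("|")] for l in table_lines]
--     rows = [[c for c in cells if c] for cells in parsed]
--     rows = [r for r in rows
--             if r and any(c.replace("-", "").replace(":", "").strip() for c in r)]
--
--     if len(rows) < 2:
--         return table_lines
--
--     headers, *data = rows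
--
--     def bullet(row: list[str]) -> str:
--         if len(headers) < 2 or len(row) < 2:
--             return "• " + " | ".join(row)
--         details = " — ".join(
--             h + ": " + v for h, v in zip(headers[1:], row[1:]) if v.strip()
--         )
--         return "• *" + row[0] + "*" + (" — " + details if details else "")
--
--     return [""] + [bullet(r) for r in data] + [""]
--
--
-- def _convert_tables_to_lists(text: str) -> str:
--     return "\n".join(_convert(text.split("\n")))
--
--
-- def _convert(lines: list[str]) -> list[str]:
--     if not lines:
--         return []
--     in_table = lines[0].strip().startswith("|")
--     if in_table:
--         k = next((i for i, l in enumerate(lines)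
--                   if not l.strip().startswith("|")), len(lines))
--         return _table_to_bullets([l.strip() for l in lines[:k]]) + _convert(lines[k:])
--     k = next((i for i, l in enumerate(lines)
--               if l.strip().startswith("|")), len(lines))
--     return lines[:k] + _convert(lines[k:])
-- ===== Notes on version B (the rewrite author's own statement) =====
-- stated objective: alternative
-- what changed: Replaces A's index-stepping while-loop with nested table-collecting while by a recursive block decomposition: each call finds the first predicate boundary with next(enumerate(...)) and slices off a whole table/non-table block, recursing on the rest; _table_to_bullets is restated as staged comprehensions (parse all lines, filter rows, map a bullet formatter over data with zip instead of range-indexing).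
import Mathlib
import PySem

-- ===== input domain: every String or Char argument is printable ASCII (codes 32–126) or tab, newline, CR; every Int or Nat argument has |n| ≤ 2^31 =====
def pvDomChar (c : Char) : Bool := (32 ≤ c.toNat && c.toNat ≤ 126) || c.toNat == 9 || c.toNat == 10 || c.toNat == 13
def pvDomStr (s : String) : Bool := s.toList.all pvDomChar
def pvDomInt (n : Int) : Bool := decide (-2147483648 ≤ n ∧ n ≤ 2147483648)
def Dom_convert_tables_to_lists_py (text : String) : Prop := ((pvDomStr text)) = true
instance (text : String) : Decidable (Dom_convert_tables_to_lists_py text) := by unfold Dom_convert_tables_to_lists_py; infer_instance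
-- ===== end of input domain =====

-- B replaces A's index-stepping while-loop (with nested table-collecting while) by a recursive
-- block decomposition: each call slices off one whole table/non-table block at the first
-- predicate boundary and recurses on the rest; _table_to_bullets becomes staged comprehensions
-- with zip instead of range-indexing. Same return value (objective: alternative, same cost).

-- ===== PORT A =====
-- "|" in line.strip() and line.strip().startswith("|")
def pvPredA (l : List Char) : Bool :=
  PySem.Chars.isIn ['|'] (PySem.Chars.strip l) && PySem.Chars.startswith (PySem.Chars.strip l) ['|']

-- c.replace("-", "").replace(":", "").strip() == ""
def pvSepA (c : List Char) : Bool :=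
  (PySem.Chars.strip (PySem.Chars.replace (PySem.Chars.replace c ['-'] []) [':'] [])).isEmpty

-- cells = [c.strip() for c in line.strip("|").split("|")]; cells = [c for c in cells if c]
def pvCellsA (line : List Char) : List (List Char) :=
  (((PySem.Chars.splitOn (PySem.Chars.stripChars line ['|']) ['|']).map PySem.Chars.strip).filter
    (fun c => !c.isEmpty))

-- body of A's `for row in rows[1:]` loop
def pvBulletA (headers row : List (List Char)) : List Char :=
  if 2 ≤ headers.length ∧ 2 ≤ row.length then
    let label := PySem.List.pyGetD row 0 []
    let details := PySem.Chars.join " — ".toList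
      (((PySem.List.pyRange 1 ((min headers.length row.length : Nat) : Int) 1).filter
          (fun j => !(PySem.Chars.strip (PySem.List.pyGetD row j [])).isEmpty)).map
        (fun j => PySem.List.pyGetD headers j [] ++ ": ".toList ++ PySem.List.pyGetD row j []))
    if details.isEmpty then "• *".toList ++ label ++ "*".toList
    else "• *".toList ++ label ++ "* — ".toList ++ details
  else "• ".toList ++ PySem.Chars.join " | ".toList row

-- _table_to_bullets (A's version: for-loops appending to rows/bullets, range-indexed details)
def pvTableToBulletsA (table_lines : List (List Char)) : List (List Char) :=
  let rows := table_lines.foldl (fun rows line =>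
    let cells := pvCellsA line
    if (!cells.isEmpty && !(cells.all pvSepA)) = true then rows ++ [cells] else rows) []
  if rows.length < 2 then table_lines
  else
    let headers := PySem.List.pyGetD rows 0 []
    let bullets := (rows.drop 1).foldl (fun bullets row => bullets ++ [pvBulletA headers row]) []
    [[]] ++ bullets ++ [[]]

-- A's inner `while` collecting table_lines (returns collected stripped lines and the rest)
def pvTakeTable : List (List Char) → List (List Char) × List (List Char)
  | [] => ([], [])
  | l :: rest =>
    if pvPredA l then
      let p := pvTakeTable rest
      (PySem.Chars.strip l :: p.1, p.2)
    else ([], l :: rest)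

theorem pvTakeTable_snd_len (xs : List (List Char)) : (pvTakeTable xs).2.length ≤ xs.length := by
  induction xs with
  | nil => simp [pvTakeTable]
  | cons l rest ih =>
    by_cases h : pvPredA l = true
    · simp [pvTakeTable, h]
      omega
    · simp [pvTakeTable, h]

-- A's outer `while i < len(lines)` loop
def pvLoopA : List (List Char) → List (List Char)
  | [] => []
  | l :: rest =>
    if pvPredA l then
      let p := pvTakeTable (l :: rest)
      pvTableToBulletsA p.1 ++ pvLoopA p.2
    else l :: pvLoopA rest
termination_by xs => xs.length
decreasing_by
  · simp only [pvTakeTable, if_pos ‹pvPredA l = true›]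
    have := pvTakeTable_snd_len rest
    simp only [List.length_cons]
    omega
  · simp

def convert_tables_to_lists_py (text : String) : String :=
  String.ofList (PySem.Chars.join ['\n'] (pvLoopA (PySem.Chars.splitOn text.toList ['\n'])))

-- ===== PORT B =====
-- l.strip().startswith("|")
def pvPredB (l : List Char) : Bool := PySem.Chars.startswith (PySem.Chars.strip l) ['|']

-- bullet(row), details via zip(headers[1:], row[1:]); guard inverted as in Source B
def pvBulletB (headers row : List (List Char)) : List Char :=
  if headers.length < 2 ∨ row.length < 2 then "• ".toList ++ PySem.Chars.join " | ".toList row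
  else
    let details := PySem.Chars.join " — ".toList
      ((((headers.drop 1).zip (row.drop 1)).filter
          (fun hv => !(PySem.Chars.strip hv.2).isEmpty)).map
        (fun hv => hv.1 ++ ": ".toList ++ hv.2))
    "• *".toList ++ PySem.List.pyGetD row 0 [] ++ "*".toList ++
      (if details.isEmpty then [] else " — ".toList ++ details)

-- _table_to_bullets (B's version: staged comprehensions parsed / rows / filtered rows,
-- then headers, *data = rows and [bullet(r) for r in data])
def pvTableToBulletsB (table_lines : List (List Char)) : List (List Char) :=
  let parsed := table_lines.map (fun l =>
    (PySem.Chars.splitOn (PySem.Chars.stripChars l ['|']) ['|']).map PySem.Chars.strip)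
  let rows0 := parsed.map (fun cells => cells.filter (fun c => !c.isEmpty))
  let rows := rows0.filter (fun r => !r.isEmpty && r.any (fun c =>
    !(PySem.Chars.strip (PySem.Chars.replace (PySem.Chars.replace c ['-'] []) [':'] [])).isEmpty))
  if rows.length < 2 then table_lines
  else
    let headers := rows.headD []
    let data := rows.drop 1
    [[]] ++ data.map (pvBulletB headers) ++ [[]]

-- _convert: recursive block decomposition; k = next((i for i,l in enumerate(lines) if …), len(lines))
def pvLoopB : List (List Char) → List (List Char)
  | [] => []
  | l :: rest =>
    if pvPredB l then
      let k := (l :: rest).findIdx (fun x => !pvPredB x)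
      pvTableToBulletsB (((l :: rest).take k).map PySem.Chars.strip) ++ pvLoopB ((l :: rest).drop k)
    else
      let k := (l :: rest).findIdx pvPredB
      (l :: rest).take k ++ pvLoopB ((l :: rest).drop k)
termination_by xs => xs.length
decreasing_by
  · have hk : (l :: rest).findIdx (fun x => !pvPredB x) = rest.findIdx (fun x => !pvPredB x) + 1 := by
      simp [List.findIdx_cons, ‹pvPredB l = true›]
    simp only [hk, List.length_drop, List.length_cons]
    omega
  · have hk : (l :: rest).findIdx pvPredB = rest.findIdx pvPredB + 1 := by
      have : pvPredB l = false := by simpa using ‹¬ pvPredB l = true›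
      simp [List.findIdx_cons, this]
    simp only [hk, List.length_drop, List.length_cons]
    omega

def convert_tables_to_lists_py_alt (text : String) : String :=
  String.ofList (PySem.Chars.join ['\n'] (pvLoopB (PySem.Chars.splitOn text.toList ['\n'])))

-- ===== PRECONDITION & SPEC =====
def Spec_convert_tables_to_lists_py (text : String) (out : String) : Prop := out = convert_tables_to_lists_py_alt text
instance (text : String) (out : String) : Decidable (Spec_convert_tables_to_lists_py text out) := by unfold Spec_convert_tables_to_lists_py; infer_instance

-- ===== CLAIM (what is proved, stated in full; the proofs are below) =====
def Claim_equal_convert_tables_to_lists_py : Prop := ∀ (text : String), Dom_convert_tables_to_lists_py text → Spec_convert_tables_to_lists_py text (convert_tables_to_lists_py text)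

-- ===== LEMMAS AND PROOFS =====

theorem pvPred_eq : pvPredA = pvPredB := by
  funext l
  unfold pvPredA pvPredB
  cases h : PySem.Chars.startswith (PySem.Chars.strip l) ['|'] with
  | false => simp
  | true =>
    have := (PySem.Chars.startswith_iff _ _).mp h
    simp [PySem.Chars.isIn_iff_infix, this.isInfix]

theorem pvGetD_drop_one {α : Type} (l : List α) (j : Nat) (d : α) :
    (l.drop 1).getD j d = l.getD (1+j) d := by
  cases l <;> simp [Nat.add_comm]

theorem pvZip_eq_range {α β : Type} (dx : α) (dy : β) : ∀ (xs : List α) (ys : List β),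
    xs.zip ys = (List.range (min xs.length ys.length)).map (fun j => (xs.getD j dx, ys.getD j dy)) := by
  intro xs
  induction xs with
  | nil => intro ys; simp
  | cons x xs ih =>
    intro ys
    cases ys with
    | nil => simp
    | cons y ys =>
      have hmin : min (xs.length + 1) (ys.length + 1) = min xs.length ys.length + 1 := by omega
      simp only [List.zip_cons_cons, List.length_cons, hmin, List.range_succ_eq_map,
        List.map_cons, List.map_map, List.getD_cons_zero, ih ys]
      rfl

theorem pvPyRange_one (m : Nat) :
    PySem.List.pyRange 1 ((m:ℤ)) 1 = (List.range (m-1)).map (fun k => ((1+k : ℕ) : ℤ)) := by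
  rw [PySem.List.pyRange_of_pos 1 (m:ℤ) one_pos]
  by_cases h : (1:ℤ) < (m:ℤ)
  · rw [if_pos h]
    have h1 : ((m:ℤ) - 1 + 1 - 1) / 1 = (m:ℤ) - 1 := by ring_nf; simp
    have ht : ((m:ℤ) - 1).toNat = m - 1 := by omega
    rw [h1, ht]
    apply List.map_congr_left
    intro k _
    push_cast
    ring
  · rw [if_neg h]
    have : m - 1 = 0 := by omega
    simp [this]

theorem pvDash : ("* — ".toList : List Char) = "*".toList ++ " — ".toList := by decide

theorem pvBullet_eq (headers row : List (List Char)) : pvBulletA headers row = pvBulletB headers row := by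
  unfold pvBulletA pvBulletB
  by_cases h : 2 ≤ headers.length ∧ 2 ≤ row.length
  · have hn : ¬(headers.length < 2 ∨ row.length < 2) := by omega
    rw [if_pos h, if_neg hn]
    have key : (((PySem.List.pyRange 1 ((min headers.length row.length : Nat) : Int) 1).filter
          (fun j => !(PySem.Chars.strip (PySem.List.pyGetD row j [])).isEmpty)).map
        (fun j => PySem.List.pyGetD headers j [] ++ ": ".toList ++ PySem.List.pyGetD row j []))
        = ((((headers.drop 1).zip (row.drop 1)).filter
          (fun hv => !(PySem.Chars.strip hv.2).isEmpty)).map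
        (fun hv => hv.1 ++ ": ".toList ++ hv.2)) := by
      have hmin : min (headers.length - 1) (row.length - 1) = min headers.length row.length - 1 := by
        omega
      rw [pvPyRange_one, pvZip_eq_range ([] : List Char) ([] : List Char),
        List.length_drop, List.length_drop, hmin, List.filter_map, List.filter_map,
        List.map_map, List.map_map]
      simp only [Function.comp_def, PySem.List.pyGetD_natCast, pvGetD_drop_one]
    rw [key]
    by_cases hd : PySem.Chars.join [' ', '—', ' ']
        (List.map (fun hv : List Char × List Char => hv.1 ++ ':' :: ' ' :: hv.2)
          (List.filter (fun hv => !(PySem.Chars.strip hv.2).isEmpty) (headers.tail.zip row.tail))) = []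
    · simp [List.drop_one, hd]
    · simp [List.drop_one, hd, pvDash]
  · have ho : headers.length < 2 ∨ row.length < 2 := by omega
    rw [if_neg h, if_pos ho]

theorem pvNotAll (l : List (List Char)) (p : List Char → Bool) :
    (!(l.all p)) = l.any (fun x => !(p x)) := by
  induction l with
  | nil => simp
  | cons c cs ih => simp [List.all_cons, List.any_cons, ← ih, Bool.not_and]

theorem pvTB_eq (tls : List (List Char)) : pvTableToBulletsA tls = pvTableToBulletsB tls := by
  have hrows : tls.foldl (fun rows line =>
      let cells := pvCellsA line
      if (!cells.isEmpty && !(cells.all pvSepA)) = true then rows ++ [cells] else rows) []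
      = ((tls.map (fun l =>
          (PySem.Chars.splitOn (PySem.Chars.stripChars l ['|']) ['|']).map PySem.Chars.strip)).map
            (fun cells => cells.filter (fun c => !c.isEmpty))).filter
          (fun r => !r.isEmpty && r.any (fun c =>
            !(PySem.Chars.strip (PySem.Chars.replace (PySem.Chars.replace c ['-'] []) [':'] [])).isEmpty)) := by
    rw [List.map_map]
    have : (tls.map (fun l => pvCellsA l)).foldl
        (fun rows cells => if (!cells.isEmpty && !(cells.all pvSepA)) = true then rows ++ [cells] else rows) []
        = tls.foldl (fun rows line =>
            let cells := pvCellsA line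
            if (!cells.isEmpty && !(cells.all pvSepA)) = true then rows ++ [cells] else rows) [] := by
      rw [List.foldl_map]
    rw [← this, PySem.List.foldl_append_if_eq_filter]
    have hmap : tls.map (fun l => pvCellsA l)
        = tls.map ((fun cells => cells.filter (fun c => !c.isEmpty)) ∘ (fun l =>
            (PySem.Chars.splitOn (PySem.Chars.stripChars l ['|']) ['|']).map PySem.Chars.strip)) := by
      simp [Function.comp_def, pvCellsA]
    rw [hmap]
    apply List.filter_congr
    intro r _
    rw [pvNotAll]
    simp only [pvSepA]
  simp only [pvTableToBulletsA, pvTableToBulletsB]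
  rw [hrows]
  split
  · rfl
  · rename_i hlen
    have hne : (((tls.map (fun l =>
          (PySem.Chars.splitOn (PySem.Chars.stripChars l ['|']) ['|']).map PySem.Chars.strip)).map
            (fun cells => cells.filter (fun c => !c.isEmpty))).filter
          (fun r => !r.isEmpty && r.any (fun c =>
            !(PySem.Chars.strip (PySem.Chars.replace (PySem.Chars.replace c ['-'] []) [':'] [])).isEmpty))) ≠ [] := by
      intro hnil
      rw [hnil] at hlen
      simp at hlen
    rw [PySem.List.foldl_append_singleton_eq_map]
    congr 1
    · congr 1
      apply List.map_congr_left
      intro row _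
      rw [pvBullet_eq]
      congr 1
      cases h : ((tls.map (fun l =>
          (PySem.Chars.splitOn (PySem.Chars.stripChars l ['|']) ['|']).map PySem.Chars.strip)).map
            (fun cells => cells.filter (fun c => !c.isEmpty))).filter
          (fun r => !r.isEmpty && r.any (fun c =>
            !(PySem.Chars.strip (PySem.Chars.replace (PySem.Chars.replace c ['-'] []) [':'] [])).isEmpty)) with
      | nil => exact absurd h hne
      | cons a t => simp [PySem.List.pyGetD]

theorem pvTakeTable_eq (xs : List (List Char)) :
    pvTakeTable xs = ((xs.takeWhile pvPredB).map PySem.Chars.strip, xs.dropWhile pvPredB) := by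
  induction xs with
  | nil => simp [pvTakeTable]
  | cons l rest ih =>
    by_cases h : pvPredB l
    · simp [pvTakeTable, pvPred_eq, h, ih]
    · simp [pvTakeTable, pvPred_eq, h]

theorem pvLoopA_cons_true {l : List Char} (rest : List (List Char)) (h : pvPredB l = true) :
    pvLoopA (l :: rest) = pvTableToBulletsB (PySem.Chars.strip l :: (rest.takeWhile pvPredB).map PySem.Chars.strip)
      ++ pvLoopA (rest.dropWhile pvPredB) := by
  have hA : pvPredA l = true := by rw [pvPred_eq]; exact h
  rw [pvLoopA, if_pos hA]
  simp only [pvTakeTable_eq]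
  simp [pvTB_eq, h]

theorem pvLoopA_cons_false {l : List Char} (rest : List (List Char)) (h : pvPredB l = false) :
    pvLoopA (l :: rest) = l :: pvLoopA rest := by
  have hA : pvPredA l = false := by rw [pvPred_eq]; exact h
  rw [pvLoopA, if_neg (by simp [hA])]

theorem pvTake_findIdx {α : Type} (p : α → Bool) : ∀ (xs : List α),
    xs.take (xs.findIdx p) = xs.takeWhile (fun x => !p x) := by
  intro xs
  induction xs with
  | nil => simp
  | cons x rest ih =>
    cases h : p x with
    | true => simp [List.findIdx_cons, h]
    | false => simp [List.findIdx_cons, h, ih]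

theorem pvDrop_findIdx {α : Type} (p : α → Bool) : ∀ (xs : List α),
    xs.drop (xs.findIdx p) = xs.dropWhile (fun x => !p x) := by
  intro xs
  induction xs with
  | nil => simp
  | cons x rest ih =>
    cases h : p x with
    | true => simp [List.findIdx_cons, h]
    | false => simp [List.findIdx_cons, h, ih]

-- A copies a maximal non-table prefix verbatim
theorem pvLoopA_copy : ∀ (xs : List (List Char)),
    pvLoopA xs = xs.takeWhile (fun l => !pvPredB l) ++ pvLoopA (xs.dropWhile (fun l => !pvPredB l)) := by
  intro xs
  induction xs with
  | nil => simp
  | cons l rest ih =>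
    cases h : pvPredB l with
    | true => simp [h]
    | false =>
      rw [pvLoopA_cons_false rest h]
      simp only [List.takeWhile_cons, List.dropWhile_cons, h, Bool.not_false, if_pos, ih]
      simp

theorem pvLoop_eq : ∀ (n : Nat) (xs : List (List Char)), xs.length ≤ n → pvLoopA xs = pvLoopB xs := by
  intro n
  induction n with
  | zero =>
    intro xs hlen
    have : xs = [] := by cases xs <;> simp_all
    subst this
    simp [pvLoopA, pvLoopB]
  | succ n ih =>
    intro xs hlen
    cases xs with
    | nil => simp [pvLoopA, pvLoopB]
    | cons l rest =>
      cases h : pvPredB l with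
      | true =>
        rw [pvLoopB, if_pos h]
        simp only [pvTake_findIdx, pvDrop_findIdx, Bool.not_not]
        rw [List.takeWhile_cons_of_pos h, List.dropWhile_cons_of_pos h]
        rw [pvLoopA_cons_true rest h]
        have hd : (rest.dropWhile pvPredB).length ≤ n := by
          have := List.length_dropWhile_le pvPredB rest
          simp only [List.length_cons] at hlen
          omega
        rw [ih _ hd]
        simp
      | false =>
        rw [pvLoopB, if_neg (by simp [h])]
        simp only [pvTake_findIdx, pvDrop_findIdx]
        rw [pvLoopA_copy (l :: rest)]
        rw [List.takeWhile_cons_of_pos (by simp [h]), List.dropWhile_cons_of_pos (by simp [h])]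
        have hd : (rest.dropWhile (fun x => !pvPredB x)).length ≤ n := by
          have := List.length_dropWhile_le (fun x => !pvPredB x) rest
          simp only [List.length_cons] at hlen
          omega
        rw [ih _ hd]

-- ===== VERDICT (by name: the statement is the Claim_ definition above) =====
theorem convert_tables_to_lists_py_spec : Claim_equal_convert_tables_to_lists_py := by
  intro text _
  unfold Spec_convert_tables_to_lists_py convert_tables_to_lists_py convert_tables_to_lists_py_alt
  rw [pvLoop_eq (PySem.Chars.splitOn text.toList ['\n']).length _ le_rfl]
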